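-- pv_equiv track=rewrite | github.com/AM-2R/PFE | Tryyyyy.py | listAdj
-- ===== SOURCE A (Python) =====
-- def Verify_in_interval(M1,M2):
--     if M1[0]<=M2[0] and M1[1]>=M2[0]:
--         return True
--     elif M1[0]<=M2[1] and M1[1]>=M2[1]:
--         return True
--     else:
--         return False
--
-- def   listAdj(M):
--     listAdj=[]
--     for i in range(len(M)):
--         listAdj.append([])
--         for j in [x for x in range(len(M)) if x != i]:
--             if Verify_in_interval(M[i],M[j]) or Verify_in_interval(M[j],M[i]) :
--                 listAdj[i].append(j)
--             else:
--                 pass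
--     return listAdj
-- ===== SOURCE B (Python) =====
-- def _bisect_left(a, x):
--     lo, hi = 0, len(a)
--     while lo < hi:
--         mid = (lo + hi) // 2
--         if a[mid] < x:
--             lo = mid + 1
--         else:
--             hi = mid
--     return lo
--
--
-- def _bisect_right(a, x):
--     lo, hi = 0, len(a)
--     while lo < hi:
--         mid = (lo + hi) // 2
--         if x < a[mid]:
--             hi = mid
--         else:
--             lo = mid + 1
--     return lo
--
--
-- def listAdj(M):
--     # Endpoint index + stabbing queries: sort the 2n endpoints once; interval i
--     # is adjacent to j iff one of them contains an endpoint of the other, so two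
--     # binary searches per interval find every owner j with an endpoint inside
--     # [M[i][0], M[i][1]]; edges are recorded symmetrically in per-row sets and
--     # each row is emitted sorted (= increasing index order, as A produces).
--     n = len(M)
--     pts = sorted([(v, i) for i, row in enumerate(M) for v in (row[0], row[1])], key=lambda p: p[0])
--     keys = [p[0] for p in pts]
--     adj = [set() for _ in range(n)]
--     for i, row in enumerate(M):
--         lo = _bisect_left(keys, row[0])
--         hi = _bisect_right(keys, row[1])
--         for v, j in pts[lo:hi]:
--             if j != i:
--                 adj[i].add(j)
--                 adj[j].add(i)
--     return [sorted(s) for s in adj]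
-- ===== Notes on version B (the rewrite author's own statement) =====
-- stated objective: faster
-- what changed: A tests all n(n-1) ordered pairs with Verify_in_interval; B sorts the 2n endpoints once and answers each interval with two hand-written binary searches (a stabbing query: intervals are adjacent iff one contains an endpoint of the other), records edges symmetrically in per-row sets, and emits each row sorted.
-- outside the precondition, e.g. on listAdj([[5]]): A returns [[]], B raises IndexError
import Mathlib
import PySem

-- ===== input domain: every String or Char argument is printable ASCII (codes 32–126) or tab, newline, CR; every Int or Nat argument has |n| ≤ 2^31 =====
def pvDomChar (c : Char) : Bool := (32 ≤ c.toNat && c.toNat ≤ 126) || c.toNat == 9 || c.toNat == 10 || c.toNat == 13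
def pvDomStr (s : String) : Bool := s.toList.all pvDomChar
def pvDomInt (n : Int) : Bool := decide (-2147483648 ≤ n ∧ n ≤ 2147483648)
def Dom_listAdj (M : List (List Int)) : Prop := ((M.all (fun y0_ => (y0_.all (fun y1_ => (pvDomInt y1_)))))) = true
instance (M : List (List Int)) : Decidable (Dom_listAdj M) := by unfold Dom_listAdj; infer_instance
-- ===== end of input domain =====

-- B replaces A's all-pairs scan by a sorted endpoint index queried with two hand-written
-- binary searches per interval (intervals are adjacent iff one contains an endpoint of the
-- other); edges are collected in per-row sets and each row emitted sorted.

-- ===== PORT A =====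
def Verify_in_interval (M1 M2 : List Int) : Bool :=
  if PySem.List.pyGetD M1 0 0 ≤ PySem.List.pyGetD M2 0 0 ∧
     PySem.List.pyGetD M1 1 0 ≥ PySem.List.pyGetD M2 0 0 then true
  else if PySem.List.pyGetD M1 0 0 ≤ PySem.List.pyGetD M2 1 0 ∧
          PySem.List.pyGetD M1 1 0 ≥ PySem.List.pyGetD M2 1 0 then true
  else false

def listAdj (M : List (List Int)) : List (List Int) :=
  (PySem.List.pyRange 0 (M.length : Int) 1).foldl (fun la i =>
    let la := la ++ [([] : List Int)]
    ((PySem.List.pyRange 0 (M.length : Int) 1).filter (fun x => x != i)).foldl (fun la j =>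
      if Verify_in_interval (PySem.List.pyGetD M i []) (PySem.List.pyGetD M j []) ||
         Verify_in_interval (PySem.List.pyGetD M j []) (PySem.List.pyGetD M i []) then
        PySem.List.pySetD la i (PySem.List.pyGetD la i [] ++ [j])
      else la) la) []

-- ===== PORT B =====
-- Source B's hand-written while-loops _bisect_left/_bisect_right (lo, hi are the Python ints,
-- always ≥ 0 here, so carried as Nat; a[mid] is in range whenever read since lo < hi ≤ len a)
def pvBLgo (a : List Int) (x : Int) (lo hi : Nat) : Nat :=
  if lo < hi then
    let mid := (lo + hi) / 2
    if a.getD mid 0 < x then pvBLgo a x (mid + 1) hi else pvBLgo a x lo mid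
  else lo
termination_by hi - lo
decreasing_by all_goals omega

def pvBisectLeft (a : List Int) (x : Int) : Nat := pvBLgo a x 0 a.length

def pvBRgo (a : List Int) (x : Int) (lo hi : Nat) : Nat :=
  if lo < hi then
    let mid := (lo + hi) / 2
    if x < a.getD mid 0 then pvBRgo a x lo mid else pvBRgo a x (mid + 1) hi
  else lo
termination_by hi - lo
decreasing_by all_goals omega

def pvBisectRight (a : List Int) (x : Int) : Nat := pvBRgo a x 0 a.length

def listAdj_alt (M : List (List Int)) : List (List Int) :=
  let n := M.length
  let pts := PySem.List.sorted
    ((PySem.List.enumerate M 0).flatMap (fun p =>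
      [(PySem.List.pyGetD p.2 0 0, p.1), (PySem.List.pyGetD p.2 1 0, p.1)]))
    (fun q => q.1)
  let keys := pts.map (fun q => q.1)
  let adj : List (List Int) := (PySem.List.pyRange 0 (n : Int) 1).map (fun _ => ([] : List Int))
  let adj := (PySem.List.enumerate M 0).foldl (fun adj p =>
    let lo := pvBisectLeft keys (PySem.List.pyGetD p.2 0 0)
    let hi := pvBisectRight keys (PySem.List.pyGetD p.2 1 0)
    (PySem.List.slice pts (some (lo : Int)) (some (hi : Int))).foldl (fun adj q =>
      if q.2 ≠ p.1 then
        let adj := PySem.List.pySetD adj p.1 (PySem.Set.add (PySem.List.pyGetD adj p.1 []) q.2)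
        PySem.List.pySetD adj q.2 (PySem.Set.add (PySem.List.pyGetD adj q.2 []) p.1)
      else adj) adj) adj
  adj.map (fun s => PySem.List.sorted s (fun x => x))

-- ===== PRECONDITION & SPEC =====
-- Pre_ excludes matrices containing a row with fewer than two numbers: with two or more rows
-- A raises IndexError there; with exactly one such row A still returns (a single empty
-- adjacency row, only because its pair loop is empty) while B reads both endpoints of every
-- row up front and raises IndexError.
def Pre_listAdj (M : List (List Int)) : Prop := ∀ row ∈ M, 2 ≤ row.length
instance (M : List (List Int)) : Decidable (Pre_listAdj M) := by unfold Pre_listAdj; infer_instance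
def pvWitness_listAdj : List (List Int) := [[0, 2], [1, 3], [5, 6]]

def Spec_listAdj (M : List (List Int)) (out : List (List Int)) : Prop := out = listAdj_alt M
instance (M : List (List Int)) (out : List (List Int)) : Decidable (Spec_listAdj M out) := by unfold Spec_listAdj; infer_instance

-- ===== CLAIM (what is proved, stated in full; the proofs are below) =====
def Claim_equal_listAdj : Prop := ∀ (M : List (List Int)), Dom_listAdj M → Pre_listAdj M → Spec_listAdj M (listAdj M)


-- ===== LEMMAS AND PROOFS =====

-- interval endpoints as both programs read them: M[i][0] and M[i][1]
def pvA (M : List (List Int)) (i : Int) : Int := PySem.List.pyGetD (PySem.List.pyGetD M i []) 0 0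
def pvB (M : List (List Int)) (i : Int) : Int := PySem.List.pyGetD (PySem.List.pyGetD M i []) 1 0

-- the symmetric pair predicate both programs decide (A as Verify ∨ Verify, B via the endpoint index)
def pvQ (M : List (List Int)) (i j : ℕ) : Bool :=
  decide ((pvA M i ≤ pvA M j ∧ pvA M j ≤ pvB M i) ∨ (pvA M i ≤ pvB M j ∧ pvB M j ≤ pvB M i) ∨
          (pvA M j ≤ pvA M i ∧ pvA M i ≤ pvB M j) ∨ (pvA M j ≤ pvB M i ∧ pvB M i ≤ pvB M j))

-- the common normal form both ports are reduced to
def pvRow (M : List (List Int)) (k : ℕ) : List Int :=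
  ((List.range M.length).filter (fun x => decide (x ≠ k) && pvQ M k x)).map (fun (x : ℕ) => (x : Int))
def pvRows (M : List (List Int)) : List (List Int) := (List.range M.length).map (pvRow M)

-- ---------- A-side: listAdj builds row i as a filtered scan of all j ≠ i ----------

def pvqA (M : List (List Int)) (i j : Int) : Bool :=
  Verify_in_interval (PySem.List.pyGetD M i []) (PySem.List.pyGetD M j []) ||
  Verify_in_interval (PySem.List.pyGetD M j []) (PySem.List.pyGetD M i [])

def pvStepA (M : List (List Int)) (la : List (List Int)) (i j : Int) : List (List Int) :=
  if pvqA M i j then PySem.List.pySetD la i (PySem.List.pyGetD la i [] ++ [j]) else la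

def pvRowA (M : List (List Int)) (i : Int) : List Int :=
  ((PySem.List.pyRange 0 (M.length : Int) 1).filter (fun x => x != i)).foldl
    (fun r j => if pvqA M i j then r ++ [j] else r) []

lemma verify_or (a b c d : Int) :
    ((if a ≤ c ∧ b ≥ c then true else if a ≤ d ∧ b ≥ d then true else false) ||
     (if c ≤ a ∧ d ≥ a then true else if c ≤ b ∧ d ≥ b then true else false))
    = decide ((a ≤ c ∧ c ≤ b) ∨ (a ≤ d ∧ d ≤ b) ∨ (c ≤ a ∧ a ≤ d) ∨ (c ≤ b ∧ b ≤ d)) := by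
  split_ifs <;> simp_all

lemma pvqA_eq_pvQ (M : List (List Int)) (i j : ℕ) : pvqA M (i : Int) (j : Int) = pvQ M i j := by
  unfold pvqA Verify_in_interval pvQ pvA pvB
  exact verify_or _ _ _ _

lemma innerA (M : List (List Int)) (i : Int) (l : List Int) (acc : List (List Int))
    (hi : i = (acc.length : Int)) :
    ∀ r : List Int,
      l.foldl (fun la2 j => pvStepA M la2 i j) (acc ++ [r])
        = acc ++ [l.foldl (fun r2 j => if pvqA M i j then r2 ++ [j] else r2) r] := by
  induction l with
  | nil => intro r; rfl
  | cons a l ih =>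
    intro r
    rw [List.foldl_cons, List.foldl_cons]
    by_cases h : pvqA M i a = true
    · have hget : PySem.List.pyGetD (acc ++ [r]) i [] = r := by
        subst hi
        rw [PySem.List.pyGetD_natCast]
        simp [List.getD]
      have hset : PySem.List.pySetD (acc ++ [r]) i (r ++ [a]) = acc ++ [r ++ [a]] := by
        subst hi
        rw [PySem.List.pySetD_natCast, List.set_append_right _ _ (le_refl _)]
        simp
      rw [show pvStepA M (acc ++ [r]) i a = acc ++ [r ++ [a]] by
            unfold pvStepA; rw [if_pos h, hget, hset]]
      rw [if_pos h]
      exact ih (r ++ [a])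
    · rw [show pvStepA M (acc ++ [r]) i a = acc ++ [r] by
            unfold pvStepA; rw [if_neg h]]
      rw [if_neg h]
      exact ih r

lemma A_outer (M : List (List Int)) :
    ∀ m : ℕ,
      (PySem.List.pyRange 0 (m : Int) 1).foldl
        (fun la i =>
          ((PySem.List.pyRange 0 (M.length : Int) 1).filter (fun x => x != i)).foldl
            (fun la2 j => pvStepA M la2 i j) (la ++ [[]]))
        [] = (List.range m).map (fun (k : ℕ) => pvRowA M (k : Int)) := by
  intro m
  induction m with
  | zero => rfl
  | succ m ih =>
    have hsplit : PySem.List.pyRange 0 ((m+1 : ℕ) : Int) 1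
        = PySem.List.pyRange 0 (m : Int) 1 ++ [(m : Int)] := by
      rw [show ((m+1 : ℕ) : Int) = (m : Int) + 1 by push_cast; ring]
      exact PySem.List.pyRange_one_succ_right (by positivity)
    rw [hsplit, List.foldl_append, ih, List.foldl_cons, List.foldl_nil]
    have h := innerA M (m : Int)
      ((PySem.List.pyRange 0 (M.length : Int) 1).filter (fun x => x != (m : Int)))
      ((List.range m).map (fun (k : ℕ) => pvRowA M (k : Int))) (by simp) []
    rw [h, List.range_succ, List.map_append]
    rfl

lemma bne_natCast (x i : ℕ) : (((x : Int)) != ((i : Int))) = decide (x ≠ i) := by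
  rw [Bool.eq_iff_iff]; simp

lemma pvRowA_eq (M : List (List Int)) (i : ℕ) : pvRowA M (i : Int) = pvRow M i := by
  unfold pvRowA pvRow
  rw [PySem.List.foldl_append_if_eq_filter, List.filter_filter, List.nil_append]
  rw [PySem.List.pyRange_one]
  simp only [Int.sub_zero, Int.toNat_natCast, zero_add]
  rw [List.filter_map]
  apply congrArg
  apply List.filter_congr
  intro x _
  simp only [Function.comp_apply]
  rw [pvqA_eq_pvQ, bne_natCast, Bool.and_comm]

lemma A_main (M : List (List Int)) : listAdj M = pvRows M := by
  have h1 : listAdj M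
      = (PySem.List.pyRange 0 (M.length : Int) 1).foldl
          (fun la i =>
            ((PySem.List.pyRange 0 (M.length : Int) 1).filter (fun x => x != i)).foldl
              (fun la2 j => pvStepA M la2 i j) (la ++ [[]]))
          [] := rfl
  rw [h1, A_outer M M.length]
  unfold pvRows
  apply List.map_congr_left
  intro k _
  exact pvRowA_eq M k

-- ---------- B-side ----------

-- "some endpoint of interval j lies inside [M[i][0], M[i][1]]"
def pvHit (M : List (List Int)) (i j : ℕ) : Prop :=
  (pvA M i ≤ pvA M j ∧ pvA M j ≤ pvB M i) ∨ (pvA M i ≤ pvB M j ∧ pvB M j ≤ pvB M i)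

lemma pvQ_iff (M : List (List Int)) (i j : ℕ) :
    pvQ M i j = true ↔ (pvHit M i j ∨ pvHit M j i) := by
  unfold pvQ pvHit
  rw [decide_eq_true_iff, or_assoc]

def pvPtsRaw (M : List (List Int)) : List (Int × Int) :=
  (PySem.List.enumerate M 0).flatMap (fun p =>
    [(PySem.List.pyGetD p.2 0 0, p.1), (PySem.List.pyGetD p.2 1 0, p.1)])
def pvPts (M : List (List Int)) : List (Int × Int) :=
  PySem.List.sorted (pvPtsRaw M) (fun q => q.1)
def pvKeys (M : List (List Int)) : List Int := (pvPts M).map (fun q => q.1)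

lemma mem_ptsRaw (M : List (List Int)) (q : Int × Int) :
    q ∈ pvPtsRaw M ↔ ∃ k : ℕ, k < M.length ∧
      (q = (pvA M (k : Int), (k : Int)) ∨ q = (pvB M (k : Int), (k : Int))) := by
  unfold pvPtsRaw
  rw [PySem.List.enumerate_eq_map_pyRange M ([] : List Int)]
  rw [show PySem.List.len M = (M.length : Int) from by simp]
  rw [PySem.List.pyRange_one]
  simp only [Int.sub_zero, Int.toNat_natCast, List.flatMap_map, List.mem_flatMap,
    List.mem_range, zero_add, List.mem_cons, List.not_mem_nil, or_false]
  unfold pvA pvB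
  constructor
  · rintro ⟨k, hk, h | h⟩ <;> exact ⟨k, hk, by simp [h]⟩
  · rintro ⟨k, hk, h | h⟩ <;> exact ⟨k, hk, by simp [h]⟩

lemma mem_pts (M : List (List Int)) (q : Int × Int) :
    q ∈ pvPts M ↔ ∃ k : ℕ, k < M.length ∧
      (q = (pvA M (k : Int), (k : Int)) ∨ q = (pvB M (k : Int), (k : Int))) := by
  rw [pvPts, PySem.List.mem_sorted]
  exact mem_ptsRaw M q

lemma keys_sorted (M : List (List Int)) : (pvKeys M).Pairwise (· ≤ ·) :=
  PySem.List.sorted_map_key_pairwise _ _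

lemma keys_getD (M : List (List Int)) (j : ℕ) :
    (pvKeys M).getD j 0 = ((pvPts M).getD j ((0 : Int), (0 : Int))).1 := by
  unfold pvKeys
  rw [List.getD, List.getD, List.getElem?_map]
  cases (pvPts M)[j]? <;> rfl

lemma length_keys (M : List (List Int)) : (pvKeys M).length = (pvPts M).length :=
  List.length_map ..

-- monotone reads from a sorted list
lemma pairwise_getD_mono (a : List Int) (ha : a.Pairwise (· ≤ ·)) (i j : ℕ)
    (hij : i ≤ j) (hj : j < a.length) : a.getD i 0 ≤ a.getD j 0 := by
  rcases Nat.lt_or_eq_of_le hij with h | h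
  · rw [List.getD_eq_getElem a 0 (lt_trans h hj), List.getD_eq_getElem a 0 hj]
    exact List.pairwise_iff_getElem.mp ha i j (lt_trans h hj) hj h
  · subst h; rfl

lemma pvBLgo_eq (a : List Int) (x : Int) (lo hi : ℕ) :
    pvBLgo a x lo hi = if lo < hi then
      (if a.getD ((lo + hi) / 2) 0 < x then pvBLgo a x ((lo + hi) / 2 + 1) hi
       else pvBLgo a x lo ((lo + hi) / 2)) else lo := by
  conv_lhs => rw [pvBLgo]

lemma pvBRgo_eq (a : List Int) (x : Int) (lo hi : ℕ) :
    pvBRgo a x lo hi = if lo < hi then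
      (if x < a.getD ((lo + hi) / 2) 0 then pvBRgo a x lo ((lo + hi) / 2)
       else pvBRgo a x ((lo + hi) / 2 + 1) hi) else lo := by
  conv_lhs => rw [pvBRgo]

lemma pvBLgo_spec (a : List Int) (x : Int) (ha : a.Pairwise (· ≤ ·)) :
    ∀ d lo hi : ℕ, hi - lo = d → lo ≤ hi → hi ≤ a.length →
      (∀ j, j < lo → a.getD j 0 < x) → (∀ j, hi ≤ j → j < a.length → x ≤ a.getD j 0) →
      pvBLgo a x lo hi ≤ a.length ∧ (∀ j, j < pvBLgo a x lo hi → a.getD j 0 < x) ∧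
        (∀ j, pvBLgo a x lo hi ≤ j → j < a.length → x ≤ a.getD j 0) := by
  intro d
  induction d using Nat.strong_induction_on with
  | _ d ih =>
    intro lo hi hd hlh hha hlow hhigh
    rw [pvBLgo_eq]
    by_cases hlt : lo < hi
    · rw [if_pos hlt]
      have hmidlo : lo ≤ (lo + hi) / 2 := by omega
      have hmidhi : (lo + hi) / 2 < hi := by omega
      have hmidlen : (lo + hi) / 2 < a.length := by omega
      by_cases hcmp : a.getD ((lo + hi) / 2) 0 < x
      · rw [if_pos hcmp]
        refine ih (hi - ((lo + hi) / 2 + 1)) (by omega) _ _ rfl (by omega) hha ?_ hhigh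
        intro j hj
        exact lt_of_le_of_lt (pairwise_getD_mono a ha j ((lo + hi) / 2) (by omega) hmidlen) hcmp
      · rw [if_neg hcmp]
        refine ih ((lo + hi) / 2 - lo) (by omega) _ _ rfl (by omega) (by omega) hlow ?_
        intro j hj hjlen
        exact le_trans (le_of_not_gt hcmp) (pairwise_getD_mono a ha _ j hj hjlen)
    · rw [if_neg hlt]
      have : lo = hi := by omega
      subst this
      exact ⟨hha, hlow, hhigh⟩

lemma pvBRgo_spec (a : List Int) (x : Int) (ha : a.Pairwise (· ≤ ·)) :
    ∀ d lo hi : ℕ, hi - lo = d → lo ≤ hi → hi ≤ a.length →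
      (∀ j, j < lo → a.getD j 0 ≤ x) → (∀ j, hi ≤ j → j < a.length → x < a.getD j 0) →
      pvBRgo a x lo hi ≤ a.length ∧ (∀ j, j < pvBRgo a x lo hi → a.getD j 0 ≤ x) ∧
        (∀ j, pvBRgo a x lo hi ≤ j → j < a.length → x < a.getD j 0) := by
  intro d
  induction d using Nat.strong_induction_on with
  | _ d ih =>
    intro lo hi hd hlh hha hlow hhigh
    rw [pvBRgo_eq]
    by_cases hlt : lo < hi
    · rw [if_pos hlt]
      have hmidlo : lo ≤ (lo + hi) / 2 := by omega
      have hmidhi : (lo + hi) / 2 < hi := by omega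
      have hmidlen : (lo + hi) / 2 < a.length := by omega
      by_cases hcmp : x < a.getD ((lo + hi) / 2) 0
      · rw [if_pos hcmp]
        refine ih ((lo + hi) / 2 - lo) (by omega) _ _ rfl (by omega) (by omega) hlow ?_
        intro j hj hjlen
        exact lt_of_lt_of_le hcmp (pairwise_getD_mono a ha _ j hj hjlen)
      · rw [if_neg hcmp]
        refine ih (hi - ((lo + hi) / 2 + 1)) (by omega) _ _ rfl (by omega) hha ?_ hhigh
        intro j hj
        exact le_trans (pairwise_getD_mono a ha j ((lo + hi) / 2) (by omega) hmidlen)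
          (le_of_not_gt hcmp)
    · rw [if_neg hlt]
      have : lo = hi := by omega
      subst this
      exact ⟨hha, hlow, hhigh⟩

lemma bisectLeft_spec' (a : List Int) (x : Int) (ha : a.Pairwise (· ≤ ·)) :
    pvBisectLeft a x ≤ a.length ∧ (∀ j, j < pvBisectLeft a x → a.getD j 0 < x) ∧
      (∀ j, pvBisectLeft a x ≤ j → j < a.length → x ≤ a.getD j 0) :=
  pvBLgo_spec a x ha a.length 0 a.length rfl (Nat.zero_le _) (le_refl _)
    (fun j hj => absurd hj (Nat.not_lt_zero j)) (fun j hj hjl => absurd hjl (by omega))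

lemma bisectRight_spec' (a : List Int) (x : Int) (ha : a.Pairwise (· ≤ ·)) :
    pvBisectRight a x ≤ a.length ∧ (∀ j, j < pvBisectRight a x → a.getD j 0 ≤ x) ∧
      (∀ j, pvBisectRight a x ≤ j → j < a.length → x < a.getD j 0) :=
  pvBRgo_spec a x ha a.length 0 a.length rfl (Nat.zero_le _) (le_refl _)
    (fun j hj => absurd hj (Nat.not_lt_zero j)) (fun j hj hjl => absurd hjl (by omega))

-- the contiguous block cut out by the two binary searches is exactly the key-range filter
lemma mem_slice_iff (pts : List (Int × Int)) (lo hi : ℕ) (x1 x2 : Int)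
    (hlo2 : ∀ j, j < lo → (pts.getD j ((0 : Int), (0 : Int))).1 < x1)
    (hlo3 : ∀ j, lo ≤ j → j < pts.length → x1 ≤ (pts.getD j ((0 : Int), (0 : Int))).1)
    (hhi2 : ∀ j, j < hi → (pts.getD j ((0 : Int), (0 : Int))).1 ≤ x2)
    (hhi3 : ∀ j, hi ≤ j → j < pts.length → x2 < (pts.getD j ((0 : Int), (0 : Int))).1)
    (q : Int × Int) :
    q ∈ PySem.List.slice pts (some (lo : Int)) (some (hi : Int)) ↔
      q ∈ pts ∧ x1 ≤ q.1 ∧ q.1 ≤ x2 := by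
  rw [PySem.List.slice_natCast]
  constructor
  · intro hq
    obtain ⟨k, hk, hEq⟩ := List.mem_iff_getElem.mp hq
    have hk1 : k < hi - lo := by
      have := hk; simp [List.length_take, List.length_drop] at this; omega
    have hk2 : lo + k < pts.length := by
      have := hk; simp [List.length_take, List.length_drop] at this; omega
    have hEq2 : pts[lo + k] = q := by
      rw [← hEq, List.getElem_take, List.getElem_drop]
    have hgd : pts.getD (lo + k) ((0 : Int), (0 : Int)) = q := by
      rw [List.getD_eq_getElem _ _ hk2, hEq2]
    refine ⟨hEq2 ▸ List.getElem_mem hk2, ?_, ?_⟩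
    · have := hlo3 (lo + k) (by omega) hk2; rw [hgd] at this; exact this
    · have := hhi2 (lo + k) (by omega); rw [hgd] at this; exact this
  · rintro ⟨hmem, h1, h2⟩
    obtain ⟨idx, hidx, hEq⟩ := List.mem_iff_getElem.mp hmem
    have hgd : pts.getD idx ((0 : Int), (0 : Int)) = q := by
      rw [List.getD_eq_getElem _ _ hidx, hEq]
    have hge : lo ≤ idx := by
      by_contra hc
      have := hlo2 idx (by omega)
      rw [hgd] at this; omega
    have hlt : idx < hi := by
      by_contra hc
      have := hhi3 idx (by omega) hidx
      rw [hgd] at this; omega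
    apply List.mem_iff_getElem.mpr
    refine ⟨idx - lo, ?_, ?_⟩
    · simp [List.length_take, List.length_drop]; omega
    · rw [List.getElem_take, List.getElem_drop]
      have hh : lo + (idx - lo) = idx := by omega
      simp only [hh]
      exact hEq

-- the inner 'for (v, j) in pts[lo:hi]' loop, over an arbitrary list of owner-tagged points
def pvStepB (i : Int) (adj : List (List Int)) (q : Int × Int) : List (List Int) :=
  if q.2 ≠ i then
    PySem.List.pySetD
      (PySem.List.pySetD adj i (PySem.Set.add (PySem.List.pyGetD adj i []) q.2)) q.2
      (PySem.Set.add
        (PySem.List.pyGetD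
          (PySem.List.pySetD adj i (PySem.Set.add (PySem.List.pyGetD adj i []) q.2)) q.2 []) i)
  else adj

lemma getD_set_list (xs : List (List Int)) (m k : ℕ) (v : List Int) (hm : m < xs.length) :
    (xs.set m v).getD k [] = if k = m then v else xs.getD k [] := by
  by_cases h : k = m
  · subst h; simp [List.getD, hm]
  · simp [List.getD, h, Ne.symm h]

lemma innerB (n : ℕ) (i0 : ℕ) (hi0 : i0 < n) (l : List (Int × Int))
    (hl : ∀ q ∈ l, ∃ k : ℕ, k < n ∧ q.2 = (k : Int)) :
    ∀ adj : List (List Int), adj.length = n → (∀ k : ℕ, (adj.getD k []).Nodup) →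
      (l.foldl (pvStepB (i0 : Int)) adj).length = n ∧
      (∀ k : ℕ, ((l.foldl (pvStepB (i0 : Int)) adj).getD k []).Nodup) ∧
      (∀ k : ℕ, k < n → ∀ x : Int,
        x ∈ (l.foldl (pvStepB (i0 : Int)) adj).getD k [] ↔
          x ∈ adj.getD k [] ∨ (k = i0 ∧ ∃ q ∈ l, q.2 ≠ (i0 : Int) ∧ x = q.2)
            ∨ (∃ q ∈ l, q.2 = (k : Int) ∧ k ≠ i0 ∧ x = (i0 : Int))) := by
  induction l with
  | nil =>
    intro adj hlen hnd
    refine ⟨hlen, hnd, ?_⟩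
    intro k hk x
    simp
  | cons q l ih =>
    intro adj hlen hnd
    obtain ⟨j0, hj0n, hj0⟩ := hl q (List.mem_cons_self ..)
    have hl' : ∀ q' ∈ l, ∃ k : ℕ, k < n ∧ q'.2 = (k : Int) :=
      fun q' hq' => hl q' (List.mem_cons_of_mem _ hq')
    rw [List.foldl_cons]
    by_cases hqi : q.2 = (i0 : Int)
    · have hstep : pvStepB (i0 : Int) adj q = adj := by
        unfold pvStepB; rw [if_neg (by simp [hqi])]
      rw [hstep]
      obtain ⟨g1, g2, g3⟩ := ih hl' adj hlen hnd
      refine ⟨g1, g2, ?_⟩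
      intro k hk x
      rw [g3 k hk x]
      constructor
      · rintro (h | ⟨hki, qq, hqq, h1, h2⟩ | ⟨qq, hqq, h1, h2, h3⟩)
        · exact Or.inl h
        · exact Or.inr (Or.inl ⟨hki, qq, List.mem_cons_of_mem _ hqq, h1, h2⟩)
        · exact Or.inr (Or.inr ⟨qq, List.mem_cons_of_mem _ hqq, h1, h2, h3⟩)
      · rintro (h | ⟨hki, qq, hqq, h1, h2⟩ | ⟨qq, hqq, h1, h2, h3⟩)
        · exact Or.inl h
        · rcases List.mem_cons.mp hqq with rfl | hmem
          · exact absurd hqi h1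
          · exact Or.inr (Or.inl ⟨hki, qq, hmem, h1, h2⟩)
        · rcases List.mem_cons.mp hqq with rfl | hmem
          · exfalso; rw [hqi] at h1; exact h2 (Int.natCast_inj.mp h1.symm)
          · exact Or.inr (Or.inr ⟨qq, hmem, h1, h2, h3⟩)
    · -- a genuine edge: row i0 gains q.2, row j0 gains i0
      have hj0i0 : j0 ≠ i0 := by
        intro hc; apply hqi; rw [hj0, hc]
      have hstep : pvStepB (i0 : Int) adj q
          = (adj.set i0 (PySem.Set.add (adj.getD i0 []) q.2)).set j0
              (PySem.Set.add (adj.getD j0 []) (i0 : Int)) := by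
        unfold pvStepB
        rw [if_pos hqi]
        rw [hj0, PySem.List.pyGetD_natCast, PySem.List.pySetD_natCast,
          PySem.List.pyGetD_natCast, PySem.List.pySetD_natCast,
          getD_set_list _ _ _ _ (by omega), if_neg hj0i0]
      rw [hstep]
      set s1 := PySem.Set.add (adj.getD i0 []) q.2 with hs1
      set s2 := PySem.Set.add (adj.getD j0 []) (i0 : Int) with hs2
      set adj' := (adj.set i0 s1).set j0 s2 with hadj'
      have hlen' : adj'.length = n := by simp [hadj', hlen]
      have hrow : ∀ k : ℕ, adj'.getD k []
          = if k = j0 then s2 else if k = i0 then s1 else adj.getD k [] := by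
        intro k
        rw [hadj', getD_set_list _ _ _ _ (by simp [hlen]; omega),
          getD_set_list _ _ _ _ (by omega)]
      have hnd' : ∀ k : ℕ, (adj'.getD k []).Nodup := by
        intro k
        rw [hrow k]
        split_ifs with h1 h2
        · exact PySem.Set.nodup_add _ _ (hnd j0)
        · exact PySem.Set.nodup_add _ _ (hnd i0)
        · exact hnd k
      obtain ⟨g1, g2, g3⟩ := ih hl' adj' hlen' hnd'
      refine ⟨g1, g2, ?_⟩
      intro k hk x
      rw [g3 k hk x, hrow k]
      have hmem_s1 : x ∈ s1 ↔ x ∈ adj.getD i0 [] ∨ x = q.2 := PySem.Set.mem_add _ _ _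
      have hmem_s2 : x ∈ s2 ↔ x ∈ adj.getD j0 [] ∨ x = (i0 : Int) := PySem.Set.mem_add _ _ _
      constructor
      · rintro (h | ⟨hki, qq, hqq, h1, h2⟩ | ⟨qq, hqq, h1, h2, h3⟩)
        · split_ifs at h with hk1 hk2
          · rcases hmem_s2.mp h with h' | h'
            · exact Or.inl (hk1 ▸ h')
            · exact Or.inr (Or.inr ⟨q, List.mem_cons_self .., by rw [hj0, hk1], hk1 ▸ hj0i0, h'⟩)
          · rcases hmem_s1.mp h with h' | h'
            · exact Or.inl (hk2 ▸ h')
            · exact Or.inr (Or.inl ⟨hk2, q, List.mem_cons_self .., hqi, h'⟩)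
          · exact Or.inl h
        · exact Or.inr (Or.inl ⟨hki, qq, List.mem_cons_of_mem _ hqq, h1, h2⟩)
        · exact Or.inr (Or.inr ⟨qq, List.mem_cons_of_mem _ hqq, h1, h2, h3⟩)
      · rintro (h | ⟨hki, qq, hqq, h1, h2⟩ | ⟨qq, hqq, h1, h2, h3⟩)
        · refine Or.inl ?_
          split_ifs with hk1 hk2
          · exact hmem_s2.mpr (Or.inl (hk1 ▸ h))
          · exact hmem_s1.mpr (Or.inl (hk2 ▸ h))
          · exact h
        · rcases List.mem_cons.mp hqq with rfl | hmem
          · refine Or.inl ?_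
            rw [if_neg (by omega), if_pos hki]
            exact hmem_s1.mpr (Or.inr h2)
          · exact Or.inr (Or.inl ⟨hki, qq, hmem, h1, h2⟩)
        · rcases List.mem_cons.mp hqq with rfl | hmem
          · refine Or.inl ?_
            have hkj0 : k = j0 := by
              rw [hj0] at h1; exact Int.natCast_inj.mp h1.symm
            rw [if_pos hkj0]
            exact hmem_s2.mpr (Or.inr h3)
          · exact Or.inr (Or.inr ⟨qq, hmem, h1, h2, h3⟩)

-- the outer loop, one interval at a time
def pvStepO (M : List (List Int)) (adj : List (List Int)) (i0 : ℕ) : List (List Int) :=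
  (PySem.List.slice (pvPts M) (some ((pvBisectLeft (pvKeys M) (pvA M (i0 : Int))) : Int))
      (some ((pvBisectRight (pvKeys M) (pvB M (i0 : Int))) : Int))).foldl
    (pvStepB (i0 : Int)) adj

def pvInit (M : List (List Int)) : List (List Int) :=
  (PySem.List.pyRange 0 (M.length : Int) 1).map (fun _ => ([] : List Int))

-- every pair processed after the first m outer iterations
def pvPm (M : List (List Int)) (m k : ℕ) (x : Int) : Prop :=
  ∃ i0 : ℕ, i0 < m ∧
    ((k = i0 ∧ ∃ j0 : ℕ, j0 < M.length ∧ j0 ≠ i0 ∧ x = (j0 : Int) ∧ pvHit M i0 j0)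
      ∨ (pvHit M i0 k ∧ k ≠ i0 ∧ x = (i0 : Int)))

lemma mem_sliceM (M : List (List Int)) (i0 : ℕ) (q : Int × Int) :
    q ∈ PySem.List.slice (pvPts M)
        (some ((pvBisectLeft (pvKeys M) (pvA M (i0 : Int))) : Int))
        (some ((pvBisectRight (pvKeys M) (pvB M (i0 : Int))) : Int)) ↔
      (∃ k : ℕ, k < M.length ∧
        (q = (pvA M (k : Int), (k : Int)) ∨ q = (pvB M (k : Int), (k : Int)))) ∧
      pvA M (i0 : Int) ≤ q.1 ∧ q.1 ≤ pvB M (i0 : Int) := by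
  obtain ⟨l1, l2, l3⟩ := bisectLeft_spec' (pvKeys M) (pvA M (i0 : Int)) (keys_sorted M)
  obtain ⟨r1, r2, r3⟩ := bisectRight_spec' (pvKeys M) (pvB M (i0 : Int)) (keys_sorted M)
  rw [mem_slice_iff (pvPts M) _ _ (pvA M (i0 : Int)) (pvB M (i0 : Int))
      (fun j hj => by rw [← keys_getD]; exact l2 j hj)
      (fun j hj hjl => by rw [← keys_getD]; exact l3 j hj (by rwa [length_keys]))
      (fun j hj => by rw [← keys_getD]; exact r2 j hj)
      (fun j hj hjl => by rw [← keys_getD]; exact r3 j hj (by rwa [length_keys]))]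
  rw [mem_pts]

lemma B_outer (M : List (List Int)) :
    ∀ m : ℕ, m ≤ M.length →
      ((List.range m).foldl (pvStepO M) (pvInit M)).length = M.length ∧
      (∀ k : ℕ, (((List.range m).foldl (pvStepO M) (pvInit M)).getD k []).Nodup) ∧
      (∀ k : ℕ, k < M.length → ∀ x : Int,
        x ∈ ((List.range m).foldl (pvStepO M) (pvInit M)).getD k [] ↔ pvPm M m k x) := by
  intro m
  induction m with
  | zero =>
    intro _
    have hinit_len : (pvInit M).length = M.length := by
      unfold pvInit
      rw [List.length_map, PySem.List.length_pyRange_one]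
      omega
    have hinit_row : ∀ k : ℕ, (pvInit M).getD k [] = [] := by
      intro k
      unfold pvInit
      rw [List.getD, List.getElem?_map]
      cases (PySem.List.pyRange 0 (M.length : Int) 1)[k]? <;> rfl
    refine ⟨by simpa using hinit_len, ?_, ?_⟩
    · intro k; rw [List.range_zero, List.foldl_nil, hinit_row k]; exact List.nodup_nil
    · intro k hk x
      rw [List.range_zero, List.foldl_nil, hinit_row k]
      simp [pvPm]
  | succ m ih =>
    intro hle
    obtain ⟨g1, g2, g3⟩ := ih (by omega)
    rw [List.range_succ, List.foldl_append, List.foldl_cons, List.foldl_nil]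
    have hm : m < M.length := by omega
    have hl : ∀ q ∈ PySem.List.slice (pvPts M)
        (some ((pvBisectLeft (pvKeys M) (pvA M (m : Int))) : Int))
        (some ((pvBisectRight (pvKeys M) (pvB M (m : Int))) : Int)),
        ∃ k : ℕ, k < M.length ∧ q.2 = (k : Int) := by
      intro q hq
      obtain ⟨⟨k, hk, hq'⟩, _, _⟩ := (mem_sliceM M m q).mp hq
      rcases hq' with h | h <;> exact ⟨k, hk, by rw [h]⟩
    obtain ⟨f1, f2, f3⟩ := innerB M.length m hm _ hl _ g1 g2
    refine ⟨f1, f2, ?_⟩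
    intro k hk x
    rw [show pvStepO M ((List.range m).foldl (pvStepO M) (pvInit M)) m
        = ((PySem.List.slice (pvPts M)
            (some ((pvBisectLeft (pvKeys M) (pvA M (m : Int))) : Int))
            (some ((pvBisectRight (pvKeys M) (pvB M (m : Int))) : Int))).foldl
          (pvStepB (m : Int)) ((List.range m).foldl (pvStepO M) (pvInit M))) from rfl]
    rw [f3 k hk x, g3 k hk x]
    constructor
    · rintro (h | ⟨hki, qq, hqq, h1, h2⟩ | ⟨qq, hqq, h1, h2, h3⟩)
      · obtain ⟨i0, hi0, hcl⟩ := h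
        exact ⟨i0, by omega, hcl⟩
      · -- row m gains owner of qq
        obtain ⟨⟨j0, hj0, hqval⟩, hb1, hb2⟩ := (mem_sliceM M m qq).mp hqq
        refine ⟨m, by omega, Or.inl ⟨hki, j0, hj0, ?_, ?_, ?_⟩⟩
        · intro hc
          apply h1
          rcases hqval with h' | h' <;> rw [h'] <;> simp [hc]
        · rcases hqval with h' | h' <;> rw [h2, h']
        · unfold pvHit
          rcases hqval with h' | h'
          · exact Or.inl ⟨by rw [h'] at hb1; exact hb1, by rw [h'] at hb2; exact hb2⟩
          · exact Or.inr ⟨by rw [h'] at hb1; exact hb1, by rw [h'] at hb2; exact hb2⟩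
      · -- row k gains m
        obtain ⟨⟨j0, hj0, hqval⟩, hb1, hb2⟩ := (mem_sliceM M m qq).mp hqq
        have hj0k : j0 = k := by
          rcases hqval with h' | h' <;> rw [h'] at h1 <;> exact Int.natCast_inj.mp h1
        subst hj0k
        refine ⟨m, by omega, Or.inr ⟨?_, h2, h3⟩⟩
        unfold pvHit
        rcases hqval with h' | h'
        · exact Or.inl ⟨by rw [h'] at hb1; exact hb1, by rw [h'] at hb2; exact hb2⟩
        · exact Or.inr ⟨by rw [h'] at hb1; exact hb1, by rw [h'] at hb2; exact hb2⟩
    · rintro ⟨i0, hi0, hcl⟩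
      rcases Nat.lt_succ_iff_lt_or_eq.mp hi0 with hlt | rfl
      · exact Or.inl ⟨i0, hlt, hcl⟩
      · rcases hcl with ⟨hki, j0, hj0, hne, hx, hhit⟩ | ⟨hhit, hne, hx⟩
        · refine Or.inr (Or.inl ⟨hki, ?_⟩)
          unfold pvHit at hhit
          rcases hhit with ⟨ha1, ha2⟩ | ⟨ha1, ha2⟩
          · refine ⟨(pvA M (j0 : Int), (j0 : Int)), ?_, by simpa using hne, by simpa using hx⟩
            exact (mem_sliceM M i0 _).mpr ⟨⟨j0, hj0, Or.inl rfl⟩, ha1, ha2⟩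
          · refine ⟨(pvB M (j0 : Int), (j0 : Int)), ?_, by simpa using hne, by simpa using hx⟩
            exact (mem_sliceM M i0 _).mpr ⟨⟨j0, hj0, Or.inr rfl⟩, ha1, ha2⟩
        · refine Or.inr (Or.inr ?_)
          unfold pvHit at hhit
          rcases hhit with ⟨ha1, ha2⟩ | ⟨ha1, ha2⟩
          · exact ⟨(pvA M (k : Int), (k : Int)),
              (mem_sliceM M i0 _).mpr ⟨⟨k, hk, Or.inl rfl⟩, ha1, ha2⟩, rfl, hne, hx⟩
          · exact ⟨(pvB M (k : Int), (k : Int)),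
              (mem_sliceM M i0 _).mpr ⟨⟨k, hk, Or.inr rfl⟩, ha1, ha2⟩, rfl, hne, hx⟩

lemma mem_pvRow (M : List (List Int)) (k : ℕ) (x : Int) :
    x ∈ pvRow M k ↔ ∃ j0 : ℕ, j0 < M.length ∧ j0 ≠ k ∧ x = (j0 : Int) ∧
      (pvHit M k j0 ∨ pvHit M j0 k) := by
  unfold pvRow
  simp only [List.mem_map, List.mem_filter, List.mem_range, Bool.and_eq_true,
    decide_eq_true_eq]
  constructor
  · rintro ⟨j0, ⟨hj0, hne, hq⟩, rfl⟩
    exact ⟨j0, hj0, hne, rfl, (pvQ_iff M k j0).mp hq⟩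
  · rintro ⟨j0, hj0, hne, rfl, hq⟩
    exact ⟨j0, ⟨hj0, hne, (pvQ_iff M k j0).mpr hq⟩, rfl⟩

lemma pvPm_final (M : List (List Int)) (k : ℕ) (hk : k < M.length) (x : Int) :
    pvPm M M.length k x ↔ ∃ j0 : ℕ, j0 < M.length ∧ j0 ≠ k ∧ x = (j0 : Int) ∧
      (pvHit M k j0 ∨ pvHit M j0 k) := by
  constructor
  · rintro ⟨i0, hi0, ⟨rfl, j0, hj0, hne, hx, hhit⟩ | ⟨hhit, hne, hx⟩⟩
    · exact ⟨j0, hj0, hne, hx, Or.inl hhit⟩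
    · exact ⟨i0, hi0, fun hc => hne hc.symm, hx, Or.inr hhit⟩
  · rintro ⟨j0, hj0, hne, hx, hhit | hhit⟩
    · exact ⟨k, hk, Or.inl ⟨rfl, j0, hj0, hne, hx, hhit⟩⟩
    · exact ⟨j0, hj0, Or.inr ⟨hhit, fun hc => hne hc.symm, hx⟩⟩

lemma pvRow_pairwise (M : List (List Int)) (k : ℕ) : (pvRow M k).Pairwise (· < ·) := by
  unfold pvRow
  exact ((List.pairwise_lt_range).filter _).map _ (fun a b h => by exact_mod_cast h)

lemma pvRow_nodup (M : List (List Int)) (k : ℕ) : (pvRow M k).Nodup :=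
  (pvRow_pairwise M k).imp (fun h => ne_of_lt h)

lemma B_main (M : List (List Int)) : listAdj_alt M = pvRows M := by
  have h1 : listAdj_alt M
      = ((PySem.List.enumerate M 0).foldl
          (fun adj p =>
            (PySem.List.slice (pvPts M)
              (some ((pvBisectLeft (pvKeys M) (PySem.List.pyGetD p.2 0 0)) : Int))
              (some ((pvBisectRight (pvKeys M) (PySem.List.pyGetD p.2 1 0)) : Int))).foldl
              (pvStepB p.1) adj)
          (pvInit M)).map (fun s => PySem.List.sorted s (fun x => x)) := rfl
  rw [h1, PySem.List.enumerate_eq_map_pyRange M ([] : List Int),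
    show PySem.List.len M = (M.length : Int) from by simp,
    PySem.List.pyRange_one]
  simp only [Int.sub_zero, Int.toNat_natCast, List.map_map]
  rw [List.foldl_map]
  have hstep : (fun (adj : List (List Int)) (k : ℕ) =>
      (PySem.List.slice (pvPts M)
        (some ((pvBisectLeft (pvKeys M)
          (PySem.List.pyGetD (((fun j => (j, PySem.List.pyGetD M j ([] : List Int))) ∘
            (fun k : ℕ => (0 : Int) + (k : Int))) k).2 0 0)) : Int))
        (some ((pvBisectRight (pvKeys M)
          (PySem.List.pyGetD (((fun j => (j, PySem.List.pyGetD M j ([] : List Int))) ∘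
            (fun k : ℕ => (0 : Int) + (k : Int))) k).2 1 0)) : Int))).foldl
        (pvStepB (((fun j => (j, PySem.List.pyGetD M j ([] : List Int))) ∘
            (fun k : ℕ => (0 : Int) + (k : Int))) k).1) adj)
      = pvStepO M := by
    funext adj k
    unfold pvStepO pvA pvB
    simp only [Function.comp_apply, zero_add]
  obtain ⟨g1, g2, g3⟩ := B_outer M M.length (le_refl _)
  rw [hstep]
  apply List.ext_getElem
  · rw [List.length_map, g1]
    unfold pvRows
    rw [List.length_map, List.length_range]
  · intro k h1' h2'
    rw [List.length_map, g1] at h1'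
    rw [List.getElem_map]
    unfold pvRows
    rw [List.getElem_map, List.getElem_range]
    rw [← List.getD_eq_getElem ((List.range M.length).foldl (pvStepO M) (pvInit M)) []
      (by rw [g1]; exact h1')]
    apply PySem.List.sorted_eq_of_perm_of_pairwise_lt
    · rw [List.perm_ext_iff_of_nodup (pvRow_nodup M k) (g2 k)]
      intro x
      rw [mem_pvRow M k x, g3 k h1' x, pvPm_final M k h1' x]
    · exact pvRow_pairwise M k

-- ===== VERDICT (by name: the statement is the Claim_ definition above) =====
theorem listAdj_spec : Claim_equal_listAdj := by
  intro M _ _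
  unfold Spec_listAdj
  rw [A_main, B_main]
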